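-- pv_equiv track=rewrite | github.com/aditya2909rb/sml-project | sml/dna_analyzer.py | _find_microsatellites
-- ===== SOURCE A (Python) =====
-- from typing import List, Dict, Optional, Tuple
--
-- def _find_microsatellites(sequence: str, min_repeats: int = 3) -> List[str]:
--     """Find microsatellite repeat patterns in DNA sequence."""
--     microsatellites = []
--
--     # Look for simple repeats
--     patterns = ['A', 'T', 'C', 'G', 'AT', 'AC', 'AG', 'CT', 'CG', 'TG']
--
--     for pattern in patterns:
--         for i in range(len(sequence) - len(pattern) + 1):
--             count = 0
--             pos = i
--             while sequence[pos:pos+len(pattern)] == pattern and pos < len(sequence):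
--                 count += 1
--                 pos += len(pattern)
--
--             if count >= min_repeats:
--                 microsatellites.append(f"{pattern}x{count}")
--
--     return microsatellites
-- ===== SOURCE B (Python) =====
-- def _find_microsatellites(sequence: str, min_repeats: int = 3):
--     """Find microsatellite repeat patterns via a right-to-left run-length DP table."""
--     n = len(sequence)
--     result = []
--     for pattern in ('A', 'T', 'C', 'G', 'AT', 'AC', 'AG', 'CT', 'CG', 'TG'):
--         L = len(pattern)
--         run = [0] * (n + L)          # run[i] = number of consecutive copies of pattern starting at i
--         for i in range(n - L, -1, -1):
--             if sequence[i:i + L] == pattern: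
--                 run[i] = run[i + L] + 1
--         for i in range(n - L + 1):
--             if run[i] >= min_repeats:
--                 result.append(f"{pattern}x{run[i]}")
--     return result
-- ===== Notes on version B (the rewrite author's own statement) =====
-- stated objective: alternative
-- what changed: Replaced the per-position rescanning while-loop by a right-to-left dynamic program that computes the tandem-repeat run length at every start index once per pattern and then emits from that table.
import Mathlib
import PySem

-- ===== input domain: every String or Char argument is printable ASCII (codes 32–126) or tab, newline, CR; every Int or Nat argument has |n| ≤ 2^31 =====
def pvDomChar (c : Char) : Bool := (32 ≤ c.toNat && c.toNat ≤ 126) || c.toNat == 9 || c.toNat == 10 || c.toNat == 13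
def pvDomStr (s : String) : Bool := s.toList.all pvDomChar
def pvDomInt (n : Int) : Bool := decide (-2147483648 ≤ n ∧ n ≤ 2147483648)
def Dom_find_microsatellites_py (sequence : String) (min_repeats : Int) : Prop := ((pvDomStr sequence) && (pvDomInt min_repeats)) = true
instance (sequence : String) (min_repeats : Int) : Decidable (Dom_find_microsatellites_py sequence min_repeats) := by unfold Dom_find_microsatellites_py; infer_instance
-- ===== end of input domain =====

-- B replaces A's per-position rescanning while-loop by a right-to-left run-length DP table
-- per pattern, emitting from that table; same return value everywhere.

-- ===== PORT A =====
-- A's inner while loop: count consecutive copies of `pat` starting at `pos`.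
-- The fuel argument (always called with s.length + 1, which is sufficient) only makes
-- the recursion total; it is never exhausted for the nonempty patterns A uses.
def pvCountFrom (s pat : List Char) : Nat → Nat → Nat → Nat
  | 0, _, count => count
  | fuel + 1, pos, count =>
    if PySem.List.slice s (some (pos : Int)) (some ((pos : Int) + (pat.length : Int))) = pat
        ∧ pos < s.length then
      pvCountFrom s pat fuel (pos + pat.length) (count + 1)
    else count

-- A's body for one pattern: the scan over all start positions.
def pvInnerA (s : List Char) (min_repeats : Int) (ms : List String) (pat : List Char) : List String :=
  (PySem.List.pyRange 0 ((s.length : Int) - (pat.length : Int) + 1) 1).foldl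
    (fun ms2 i =>
      let count := pvCountFrom s pat (s.length + 1) i.toNat 0
      if min_repeats ≤ (count : Int) then
        ms2 ++ [String.ofList (pat ++ 'x' :: (PySem.Int.toStr (count : Int)).toList)]
      else ms2) ms

def pvPatterns : List (List Char) :=
  [['A'], ['T'], ['C'], ['G'], ['A','T'], ['A','C'], ['A','G'], ['C','T'], ['C','G'], ['T','G']]

def find_microsatellites_py (sequence : String) (min_repeats : Int) : List String :=
  pvPatterns.foldl (pvInnerA sequence.toList min_repeats) []

-- ===== PORT B =====
-- B's right-to-left DP: run[i] = number of consecutive copies of `pat` starting at i.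
def pvRunFold (s pat : List Char) : List Int :=
  (PySem.List.pyRange ((s.length : Int) - (pat.length : Int)) (-1) (-1)).foldl
    (fun run i =>
      if PySem.List.slice s (some i) (some (i + (pat.length : Int))) = pat then
        PySem.List.pySetD run i (PySem.List.pyGetD run (i + (pat.length : Int)) 0 + 1)
      else run)
    (List.replicate (s.length + pat.length) 0)

-- B's body for one pattern: build the run table, then emit from it.
def pvInnerB (s : List Char) (min_repeats : Int) (result : List String) (pat : List Char) : List String :=
  let run := pvRunFold s pat
  (PySem.List.pyRange 0 ((s.length : Int) - (pat.length : Int) + 1) 1).foldl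
    (fun res i =>
      if min_repeats ≤ PySem.List.pyGetD run i 0 then
        res ++ [String.ofList (pat ++ 'x' :: (PySem.Int.toStr (PySem.List.pyGetD run i 0)).toList)]
      else res) result

def find_microsatellites_py_alt (sequence : String) (min_repeats : Int) : List String :=
  pvPatterns.foldl (pvInnerB sequence.toList min_repeats) []

-- ===== PRECONDITION & SPEC =====
def Spec_find_microsatellites_py (sequence : String) (min_repeats : Int) (out : List String) : Prop := out = find_microsatellites_py_alt sequence min_repeats
instance (sequence : String) (min_repeats : Int) (out : List String) : Decidable (Spec_find_microsatellites_py sequence min_repeats out) := by unfold Spec_find_microsatellites_py; infer_instance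

-- ===== CLAIM (what is proved, stated in full; the proofs are below) =====
def Claim_equal_find_microsatellites_py : Prop := ∀ (sequence : String) (min_repeats : Int), Dom_find_microsatellites_py sequence min_repeats → Spec_find_microsatellites_py sequence min_repeats (find_microsatellites_py sequence min_repeats)

-- ===== LEMMAS AND PROOFS =====

-- canonical run length starting at pos (A's loop with full fuel and zero accumulator)
def pvRep (s pat : List Char) (pos : Nat) : Nat := pvCountFrom s pat (s.length + 1) pos 0

theorem pvCountFrom_acc (s pat : List Char) :
    ∀ (fuel pos c : Nat), pvCountFrom s pat fuel pos c = c + pvCountFrom s pat fuel pos 0 := by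
  intro fuel
  induction fuel with
  | zero => intro pos c; simp [pvCountFrom]
  | succ f ih =>
    intro pos c
    simp only [pvCountFrom]
    split
    · rw [ih (pos + pat.length) (c + 1), ih (pos + pat.length) (0 + 1)]; omega
    · omega

theorem pvSlice_eq_len (s pat : List Char) (pos : Nat)
    (h : PySem.List.slice s (some (pos : Int)) (some ((pos : Int) + (pat.length : Int))) = pat) :
    min (pos + pat.length) s.length - min pos s.length = pat.length := by
  have hb : (pos : Int) + (pat.length : Int) = ((pos + pat.length : Nat) : Int) := by push_cast; ring
  rw [hb] at h
  have := congrArg List.length h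
  rw [PySem.List.length_slice, PySem.List.clampIdx_natCast, PySem.List.clampIdx_natCast] at this
  omega

theorem pvCountFrom_fuel (s pat : List Char) (hp : 0 < pat.length) :
    ∀ (fuel fuel' pos c : Nat), s.length - pos < fuel → s.length - pos < fuel' →
      pvCountFrom s pat fuel pos c = pvCountFrom s pat fuel' pos c := by
  intro fuel
  induction fuel with
  | zero => intro _ _ _ h _; omega
  | succ f ih =>
    intro fuel' pos c h h'
    obtain ⟨f', rfl⟩ : ∃ f', fuel' = f' + 1 := ⟨fuel' - 1, by omega⟩
    simp only [pvCountFrom]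
    split
    · rename_i hc
      have hlen := pvSlice_eq_len s pat pos hc.1
      have hle : pos + pat.length ≤ s.length := by
        rcases hc with ⟨_, hpos⟩; omega
      exact ih f' (pos + pat.length) (c + 1) (by omega) (by omega)
    · rfl

theorem pvRep_rec (s pat : List Char) (hp : 0 < pat.length) (pos : Nat) :
    pvRep s pat pos =
      if PySem.List.slice s (some (pos : Int)) (some ((pos : Int) + (pat.length : Int))) = pat
          ∧ pos < s.length then
        pvRep s pat (pos + pat.length) + 1
      else 0 := by
  unfold pvRep
  conv_lhs => rw [pvCountFrom]
  split
  · rename_i hc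
    have hlen := pvSlice_eq_len s pat pos hc.1
    have hle : pos + pat.length ≤ s.length := by rcases hc with ⟨_, hpos⟩; omega
    rw [pvCountFrom_acc]
    rw [pvCountFrom_fuel s pat hp s.length (s.length + 1) (pos + pat.length) 0
        (by omega) (by omega)]
    omega
  · rfl

theorem pvRep_zero_of_short (s pat : List Char) (hp : 0 < pat.length) (pos : Nat)
    (h : s.length < pos + pat.length) : pvRep s pat pos = 0 := by
  rw [pvRep_rec s pat hp]
  split
  · rename_i hc
    have hlen := pvSlice_eq_len s pat pos hc.1
    rcases hc with ⟨_, hpos⟩; omega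
  · rfl

-- the run table built by B's descending loop holds pvRep at every index
theorem pvRunFold_inv (s pat : List Char) (hp : 0 < pat.length) :
    ∀ (k : Nat) (run : List Int), (k : Int) - 1 ≤ (s.length : Int) - (pat.length : Int) →
      run.length = s.length + pat.length →
      (∀ j : Nat, (k : Int) - 1 < (j : Int) → PySem.List.pyGetD run (j : Int) 0 = (pvRep s pat j : Int)) →
      (∀ j : Nat, (j : Int) ≤ (k : Int) - 1 → PySem.List.pyGetD run (j : Int) 0 = 0) →
      ∀ j : Nat,
        PySem.List.pyGetD
          ((PySem.List.pyRange ((k : Int) - 1) (-1) (-1)).foldl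
            (fun run i =>
              if PySem.List.slice s (some i) (some (i + (pat.length : Int))) = pat then
                PySem.List.pySetD run i (PySem.List.pyGetD run (i + (pat.length : Int)) 0 + 1)
              else run) run) (j : Int) 0 = (pvRep s pat j : Int) := by
  intro k
  induction k with
  | zero =>
    intro run _ _ hrep _ j
    rw [PySem.List.pyRange_neg_one_eq_nil (by omega)]
    exact hrep j (by omega)
  | succ k ih =>
    intro run hk hlen hrep hzero j
    have hcast : ((k + 1 : Nat) : Int) - 1 = (k : Int) := by push_cast; ring
    rw [hcast, PySem.List.pyRange_neg_one_cons (by omega), List.foldl_cons]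
    have hklen : k < run.length := by omega
    -- the body applied once at index k
    set run1 := (if PySem.List.slice s (some (k : Int)) (some ((k : Int) + (pat.length : Int))) = pat then
        PySem.List.pySetD run (k : Int) (PySem.List.pyGetD run ((k : Int) + (pat.length : Int)) 0 + 1)
      else run) with hrun1
    have hlen1 : run1.length = s.length + pat.length := by
      rw [hrun1]; split
      · rw [PySem.List.length_pySetD]; exact hlen
      · exact hlen
    have hget1 : ∀ j : Nat, (k : Int) - 1 < (j : Int) → PySem.List.pyGetD run1 (j : Int) 0 = (pvRep s pat j : Int) := by
      intro j hj
      by_cases hjk : j = k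
      · subst hjk
        rw [hrun1]
        split
        · rename_i hsl
          rw [PySem.List.pyGetD_pySetD_natCast _ _ _ _ _ hklen, if_pos rfl]
          have hcast2 : (j : Int) + (pat.length : Int) = ((j + pat.length : Nat) : Int) := by push_cast; ring
          rw [hcast2, hrep (j + pat.length) (by omega)]
          have hsl' := pvSlice_eq_len s pat j hsl
          rw [pvRep_rec s pat hp j, if_pos (And.intro hsl (show j < s.length by omega))]
          push_cast; ring
        · rename_i hsl
          rw [hzero j (by omega), pvRep_rec s pat hp j, if_neg (fun hc => hsl hc.1)]
          simp
      · have hj' : (k : Int) < (j : Int) := by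
          have : k ≠ j := fun h => hjk h.symm
          omega
        rw [hrun1]
        split
        · rw [PySem.List.pyGetD_pySetD_natCast _ _ _ _ _ hklen, if_neg (by omega)]
          exact hrep j (by omega)
        · exact hrep j (by omega)
    have hzero1 : ∀ j : Nat, (j : Int) ≤ (k : Int) - 1 → PySem.List.pyGetD run1 (j : Int) 0 = 0 := by
      intro j hj
      rw [hrun1]
      split
      · rw [PySem.List.pyGetD_pySetD_natCast _ _ _ _ _ hklen, if_neg (by omega)]
        exact hzero j (by omega)
      · exact hzero j (by omega)
    exact ih run1 (by omega) hlen1 hget1 hzero1 j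

theorem pvRunFold_getD (s pat : List Char) (hp : 0 < pat.length) (j : Nat) :
    PySem.List.pyGetD (pvRunFold s pat) (j : Int) 0 = (pvRep s pat j : Int) := by
  unfold pvRunFold
  by_cases hn : (s.length : Int) - (pat.length : Int) < -1
  · -- both the DP loop range and every rep are trivial: sequence far shorter than pattern
    rw [PySem.List.pyRange_neg_one_eq_nil (by omega)]
    simp only [List.foldl_nil]
    rw [pvRep_zero_of_short s pat hp j (by omega)]
    simp [PySem.List.pyGetD_natCast]
  · have hk : ((s.length + 1 - pat.length : Nat) : Int) - 1 = (s.length : Int) - (pat.length : Int) := by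
      omega
    rw [← hk]
    apply pvRunFold_inv s pat hp (s.length + 1 - pat.length) _ (by omega)
        (by simp) _ _ j
    · intro j hj
      rw [pvRep_zero_of_short s pat hp j (by omega)]
      simp [PySem.List.pyGetD_natCast]
    · intro j _
      simp [PySem.List.pyGetD_natCast]

theorem pvInner_eq (s : List Char) (min_repeats : Int) (acc : List String) (pat : List Char)
    (hp : 0 < pat.length) : pvInnerA s min_repeats acc pat = pvInnerB s min_repeats acc pat := by
  unfold pvInnerA pvInnerB
  apply PySem.List.foldl_congr_mem
  intro ms2 i hi
  rw [PySem.List.mem_pyRange_one] at hi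
  have hi0 : i = ((i.toNat : Nat) : Int) := by omega
  have hrun : PySem.List.pyGetD (pvRunFold s pat) i 0 = (pvRep s pat i.toNat : Int) := by
    rw [hi0]; exact pvRunFold_getD s pat hp i.toNat
  rw [hrun]
  rfl

theorem pvFoldl_patterns (s : List Char) (m : Int) :
    ∀ (pats : List (List Char)), (∀ p ∈ pats, 0 < p.length) → ∀ acc,
      pats.foldl (pvInnerA s m) acc = pats.foldl (pvInnerB s m) acc := by
  intro pats
  induction pats with
  | nil => intro _ _; rfl
  | cons p ps ih =>
    intro h acc
    simp only [List.foldl_cons]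
    rw [pvInner_eq s m acc p (h p (by simp))]
    exact ih (fun q hq => h q (by simp [hq])) _

-- ===== VERDICT (by name: the statement is the Claim_ definition above) =====
theorem find_microsatellites_py_spec : Claim_equal_find_microsatellites_py := by
  intro sequence min_repeats _
  unfold Spec_find_microsatellites_py find_microsatellites_py find_microsatellites_py_alt
  exact pvFoldl_patterns sequence.toList min_repeats pvPatterns (by decide) []
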